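-- pv_equiv track=rewrite | github.com/Beeseey/trec_covid_random_bert | results.py | get_segment_idx
-- ===== SOURCE A (Python) =====
-- def get_segment_idx(token_ids):
--
-- 	token_segment = []
-- 	a = 0
-- 	for idx in token_ids:
-- 		token_segment.append(a)
-- 		if idx == 102:
-- 			a = 1
-- 	return token_segment
-- ===== SOURCE B (Python) =====
-- def get_segment_idx(token_ids):
--     n = len(token_ids)
--     if 102 in token_ids:
--         i = token_ids.index(102)
--         return [0] * (i + 1) + [1] * (n - i - 1)
--     return [0] * n
-- ===== Notes on version B (the rewrite author's own statement) =====
-- stated objective: alternative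
-- what changed: Replaces the stateful append-and-flip loop by finding the first occurrence of 102 with index() and concatenating two constant runs of zeros and ones.
import Mathlib
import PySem

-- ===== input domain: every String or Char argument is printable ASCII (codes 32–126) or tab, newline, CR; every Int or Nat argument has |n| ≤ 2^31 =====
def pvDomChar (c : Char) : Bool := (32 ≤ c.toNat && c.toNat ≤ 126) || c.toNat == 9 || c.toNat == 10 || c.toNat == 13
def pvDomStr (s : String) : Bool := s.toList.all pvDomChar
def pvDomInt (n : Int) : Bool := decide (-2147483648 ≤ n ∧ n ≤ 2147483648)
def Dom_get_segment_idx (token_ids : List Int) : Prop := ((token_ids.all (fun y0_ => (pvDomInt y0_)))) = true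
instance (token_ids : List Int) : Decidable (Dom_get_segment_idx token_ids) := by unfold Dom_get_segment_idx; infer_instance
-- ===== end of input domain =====

-- B replaces A's stateful append-and-flip loop by locating the first 102 and concatenating two constant runs (alternative decomposition, same cost).


-- ===== PORT A =====
-- the loop: append the current segment value a, then flip a to 1 after seeing 102
def get_segment_idx_loop (a : Int) : List Int → List Int
  | [] => []
  | idx :: rest => a :: get_segment_idx_loop (if idx = 102 then 1 else a) rest

def get_segment_idx (token_ids : List Int) : List Int :=
  get_segment_idx_loop 0 token_ids

-- ===== PORT B =====
def get_segment_idx_alt (token_ids : List Int) : List Int :=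
  match PySem.List.index? token_ids 102 with
  | some i => List.replicate (i + 1) 0 ++ List.replicate (token_ids.length - i - 1) 1
  | none => List.replicate token_ids.length 0

-- ===== PRECONDITION & SPEC =====
def Spec_get_segment_idx (token_ids : List Int) (out : List Int) : Prop := out = get_segment_idx_alt token_ids
instance (token_ids : List Int) (out : List Int) : Decidable (Spec_get_segment_idx token_ids out) := by unfold Spec_get_segment_idx; infer_instance

-- ===== CLAIM (what is proved, stated in full; the proofs are below) =====
def Claim_equal_get_segment_idx : Prop := ∀ (token_ids : List Int), Dom_get_segment_idx token_ids → Spec_get_segment_idx token_ids (get_segment_idx token_ids)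

-- ===== LEMMAS AND PROOFS =====
theorem loop_one (xs : List Int) : get_segment_idx_loop 1 xs = List.replicate xs.length 1 := by
  induction xs with
  | nil => rfl
  | cons x xs ih => simp [get_segment_idx_loop, ih, List.replicate_succ]

theorem loop_zero (xs : List Int) : get_segment_idx_loop 0 xs = get_segment_idx_alt xs := by
  induction xs with
  | nil => rfl
  | cons x xs ih =>
    by_cases h : x = 102
    · subst h
      unfold get_segment_idx_alt
      rw [PySem.List.index?_cons_self]
      simp [get_segment_idx_loop, loop_one]
    · have hidx := PySem.List.index?_cons_of_ne (v := (102 : Int)) (xs := xs) h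
      simp only [get_segment_idx_loop, if_neg h, ih, get_segment_idx_alt, hidx]
      cases hi : PySem.List.index? xs 102 with
      | none => simp [List.replicate_succ]
      | some i =>
        have hk := PySem.List.getElem_of_index?_eq_some hi
        obtain ⟨hk, _, _⟩ := hk
        simp [List.replicate_succ]

-- ===== VERDICT (by name: the statement is the Claim_ definition above) =====
theorem get_segment_idx_spec : Claim_equal_get_segment_idx := by
  intro xs _
  unfold Spec_get_segment_idx get_segment_idx
  exact loop_zero xs
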